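-- pv_equiv track=rewrite | github.com/NickCascarano/s23-python-proj-NickCascarano | celtsoccer/stats/stats.py | most_common_club
-- ===== SOURCE A (Python) =====
-- def most_common_club(primary_data, club_country_data):
--     club_minutes = {}
--     for club in club_country_data:
--         total_minutes = 0
--         for country in club_country_data[club]:
--             for player in club_country_data[club][country]:
--                 player_data = primary_data[country][player]
--                 total_minutes += player_data[6]
--         club_minutes[club] = total_minutes
--
--     max_minutes = None
--     max_club = None
--     for club, minutes in club_minutes.items():
--         if max_minutes is None or minutes > max_minutes:
--             max_minutes = minutes
--             max_club = club
--
--     return (max_club, max_minutes)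
-- ===== SOURCE B (Python) =====
-- def most_common_club(primary_data, club_country_data):
--     totals = [(club, sum(primary_data[country][player][6]
--                          for country, players in countries.items()
--                          for player in players))
--               for club, countries in club_country_data.items()]
--     return sorted(totals, key=lambda t: t[1], reverse=True)[0]
-- ===== Notes on version B (the rewrite author's own statement) =====
-- stated objective: alternative
-- what changed: Instead of filling a club_minutes dict and scanning it with a running max, B builds a flat (club, total) list in one comprehension and selects the winner by a stable descending sort on the total (sorted(..., reverse=True)[0]), which preserves A's first-maximal tie-breaking.
-- outside the precondition, e.g. on most_common_club({}, {}): A returns (None, None), B raises IndexError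
import Mathlib
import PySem

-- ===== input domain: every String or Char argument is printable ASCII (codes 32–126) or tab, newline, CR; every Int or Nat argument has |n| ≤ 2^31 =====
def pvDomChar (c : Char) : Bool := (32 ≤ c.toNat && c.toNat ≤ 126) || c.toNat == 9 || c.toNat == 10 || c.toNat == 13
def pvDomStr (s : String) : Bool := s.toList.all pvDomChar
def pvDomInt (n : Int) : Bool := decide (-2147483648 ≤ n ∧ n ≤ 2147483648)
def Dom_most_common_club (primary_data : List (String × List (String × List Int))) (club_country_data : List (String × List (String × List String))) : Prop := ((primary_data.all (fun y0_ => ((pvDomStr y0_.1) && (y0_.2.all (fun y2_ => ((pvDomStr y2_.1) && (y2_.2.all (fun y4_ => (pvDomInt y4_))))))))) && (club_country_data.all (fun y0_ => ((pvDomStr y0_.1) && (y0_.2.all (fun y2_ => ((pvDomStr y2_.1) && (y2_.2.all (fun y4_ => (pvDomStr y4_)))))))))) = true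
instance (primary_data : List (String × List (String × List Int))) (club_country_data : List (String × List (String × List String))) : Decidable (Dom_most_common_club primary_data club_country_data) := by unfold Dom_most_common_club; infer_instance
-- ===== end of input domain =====

-- B ranks clubs by a stable descending library sort of a staged (club, total) list and takes the
-- first entry, instead of A's club_minutes dict plus running-max scan; return value only, no mutation.

-- ===== PORT A =====
def most_common_club (primary_data : List (String × List (String × List Int))) (club_country_data : List (String × List (String × List String))) : String × Int :=
  let club_minutes : PySem.Dict String Int :=
    club_country_data.foldl (fun cm club_entry =>
      cm.insert club_entry.1
        (((PySem.Dict.mk club_country_data).getD club_entry.1 []).foldl (fun tm country_entry =>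
          ((PySem.Dict.mk ((PySem.Dict.mk club_country_data).getD club_entry.1 [])).getD country_entry.1 []).foldl
            (fun tm player =>
              tm + PySem.List.pyGetD
                ((PySem.Dict.mk ((PySem.Dict.mk primary_data).getD country_entry.1 [])).getD player []) 6 0)
            tm) 0))
      PySem.Dict.empty
  let r := club_minutes.items.foldl (fun (acc : Option (String × Int)) kv =>
      match acc with
      | none => some kv
      | some best => if kv.2 > best.2 then some kv else some best) none
  r.getD ("", 0)  -- unreachable default: Pre_ requires club_country_data ≠ []

-- ===== PORT B =====
def most_common_club_alt (primary_data : List (String × List (String × List Int))) (club_country_data : List (String × List (String × List String))) : String × Int :=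
  let totals := club_country_data.map (fun e =>
    (e.1, (e.2.flatMap (fun ce =>
        ce.2.map (fun player =>
          PySem.List.pyGetD
            ((PySem.Dict.mk ((PySem.Dict.mk primary_data).getD ce.1 [])).getD player []) 6 0))).sum))
  PySem.List.pyGetD (PySem.List.sorted totals (fun t => t.2) true) 0 ("", 0)
  -- the index-0 default is unreachable: Pre_ requires club_country_data ≠ []

-- ===== PRECONDITION & SPEC =====
-- helper for Pre_: primary_data[country][player] exists and has an index 6
def pvLookupOk (primary_data : List (String × List (String × List Int))) (country player : String) : Bool :=
  match (PySem.Dict.mk primary_data).get? country with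
  | none => false
  | some players =>
    match (PySem.Dict.mk players).get? player with
    | none => false
    | some v => decide (6 < v.length)

-- Pre_ excludes: empty club_country_data (A returns (None, None), not a str×int pair, and B raises
-- IndexError); inputs whose primary_data lookups raise KeyError or whose stat list raises IndexError
-- at index 6; and association-list encodings with duplicate club keys or duplicate country keys
-- inside one club, which no Python dict can represent (dict-overwrite behaviour there is accidental).
def Pre_most_common_club (primary_data : List (String × List (String × List Int))) (club_country_data : List (String × List (String × List String))) : Prop :=
  club_country_data ≠ [] ∧
  (club_country_data.map Prod.fst).Nodup ∧
  (∀ e ∈ club_country_data, (e.2.map Prod.fst).Nodup) ∧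
  ∀ e ∈ club_country_data, ∀ ce ∈ e.2, ∀ p ∈ ce.2, pvLookupOk primary_data ce.1 p = true

instance (primary_data : List (String × List (String × List Int))) (club_country_data : List (String × List (String × List String))) : Decidable (Pre_most_common_club primary_data club_country_data) := by unfold Pre_most_common_club; infer_instance

def pvWitness_most_common_club : (List (String × List (String × List Int))) × (List (String × List (String × List String))) :=
  ([("US", [("Ann", [0, 0, 0, 0, 0, 0, 90])])], [("Celts", [("US", ["Ann"])])])

def Spec_most_common_club (primary_data : List (String × List (String × List Int))) (club_country_data : List (String × List (String × List String))) (out : String × Int) : Prop := out = most_common_club_alt primary_data club_country_data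
instance (primary_data : List (String × List (String × List Int))) (club_country_data : List (String × List (String × List String))) (out : String × Int) : Decidable (Spec_most_common_club primary_data club_country_data out) := by unfold Spec_most_common_club; infer_instance

-- ===== CLAIM (what is proved, stated in full; the proofs are below) =====
def Claim_equal_most_common_club : Prop := ∀ (primary_data : List (String × List (String × List Int))) (club_country_data : List (String × List (String × List String))), Dom_most_common_club primary_data club_country_data → Pre_most_common_club primary_data club_country_data → Spec_most_common_club primary_data club_country_data (most_common_club primary_data club_country_data)

-- ===== LEMMAS AND PROOFS =====

lemma pv_sum_flatMap {α β : Type} (l : List α) (g : α → List β) [AddCommMonoid β] :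
    (l.flatMap g).sum = (l.map (fun x => (g x).sum)).sum := by
  induction l with
  | nil => simp
  | cons x xs ih => simp [List.flatMap_cons, ih]

lemma pv_items_insert_loop (ccd : List (String × List (String × List String))) (v : (String × List (String × List String)) → Int)
    (hnd : (ccd.map Prod.fst).Nodup) :
    (ccd.foldl (fun cm e => cm.insert e.1 (v e)) PySem.Dict.empty).items
      = ccd.map (fun e => (e.1, v e)) := by
  have := PySem.Dict.items_foldl_insert_fresh ccd Prod.fst v PySem.Dict.empty
    (fun a _ => PySem.Dict.contains_empty _) hnd
  simpa using this

lemma pv_getD_mk {α : Type} (l : List (String × α)) (e : String × α) (he : e ∈ l)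
    (hnd : (l.map Prod.fst).Nodup) (d0 : α) :
    (PySem.Dict.mk l).getD e.1 d0 = e.2 := by
  refine PySem.Dict.getD_of_mem_items (PySem.Dict.mk l) ?_ ?_ d0
  · show (e.1, e.2) ∈ l
    simpa using he
  · simpa [PySem.Dict.keys] using hnd

lemma pv_head_insertBy (x h : String × Int) (t : List (String × Int)) :
    (PySem.List.insertBy (fun a b : String × Int => decide (b.2 < a.2)) x (h :: t)).head?
      = some (if h.2 < x.2 then x else h) := by
  simp [PySem.List.insertBy]
  split_ifs <;> simp

lemma pv_fold_max_head (rest : List (String × Int)) (bst : String × Int)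
    (acc : List (String × Int)) (h : acc.head? = some bst) :
    rest.foldl (fun (acc : Option (String × Int)) kv =>
        match acc with
        | none => some kv
        | some best => if kv.2 > best.2 then some kv else some best) (some bst)
      = (rest.foldl (fun acc x =>
          PySem.List.insertBy (fun a b : String × Int => decide (b.2 < a.2)) x acc) acc).head? := by
  induction rest generalizing bst acc with
  | nil => simp [h]
  | cons x xs ih =>
    cases acc with
    | nil => simp at h
    | cons h0 t =>
      have hb : bst = h0 := by simpa using h.symm
      subst hb
      simp only [List.foldl_cons, gt_iff_lt]
      by_cases hc : bst.2 < x.2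
      · rw [if_pos hc]
        apply ih
        rw [pv_head_insertBy]
        simp [hc]
      · rw [if_neg hc]
        apply ih
        rw [pv_head_insertBy]
        simp [hc]

lemma pv_max_eq_sorted_head (l : List (String × Int)) (hne : l ≠ []) :
    (l.foldl (fun (acc : Option (String × Int)) kv =>
        match acc with
        | none => some kv
        | some best => if kv.2 > best.2 then some kv else some best) none).getD ("", 0)
      = PySem.List.pyGetD (PySem.List.sorted l (fun t => t.2) true) 0 ("", 0) := by
  rw [PySem.List.sorted_rev_eq_foldl_insertBy]
  cases l with
  | nil => exact absurd rfl hne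
  | cons e rest =>
    simp only [List.foldl_cons]
    rw [pv_fold_max_head rest e (PySem.List.insertBy (fun a b : String × Int => decide (b.2 < a.2)) e []) rfl,
      PySem.List.pyGetD_zero]
    cases (rest.foldl (fun acc x =>
        PySem.List.insertBy (fun a b : String × Int => decide (b.2 < a.2)) x acc)
        (PySem.List.insertBy (fun a b : String × Int => decide (b.2 < a.2)) e [])) with
    | nil => simp
    | cons a b => simp

-- ===== VERDICT (by name: the statement is the Claim_ definition above) =====
theorem most_common_club_spec : Claim_equal_most_common_club := by
  intro primary_data ccd _ hpre
  obtain ⟨hne, hnd, hnd2, -⟩ := hpre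
  show most_common_club primary_data ccd = most_common_club_alt primary_data ccd
  unfold most_common_club most_common_club_alt
  simp only []
  rw [pv_items_insert_loop ccd _ hnd]
  have hmap : ccd.map (fun e =>
      (e.1, ((PySem.Dict.mk ccd).getD e.1 []).foldl (fun tm country_entry =>
        ((PySem.Dict.mk ((PySem.Dict.mk ccd).getD e.1 [])).getD country_entry.1 []).foldl
          (fun tm player =>
            tm + PySem.List.pyGetD
              ((PySem.Dict.mk ((PySem.Dict.mk primary_data).getD country_entry.1 [])).getD player []) 6 0)
          tm) 0))
      = ccd.map (fun e =>
      (e.1, (e.2.flatMap (fun ce =>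
          ce.2.map (fun player =>
            PySem.List.pyGetD
              ((PySem.Dict.mk ((PySem.Dict.mk primary_data).getD ce.1 [])).getD player []) 6 0))).sum)) := by
    apply List.map_congr_left
    intro e he
    have h1 : (PySem.Dict.mk ccd).getD e.1 [] = e.2 := pv_getD_mk ccd e he hnd []
    rw [h1]
    congr 1
    rw [pv_sum_flatMap]
    have hc : e.2.foldl (fun tm ce =>
        ((PySem.Dict.mk e.2).getD ce.1 []).foldl
          (fun tm player =>
            tm + PySem.List.pyGetD
              ((PySem.Dict.mk ((PySem.Dict.mk primary_data).getD ce.1 [])).getD player []) 6 0)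
          tm) 0
        = e.2.foldl (fun tm ce =>
          tm + (ce.2.map (fun player =>
            PySem.List.pyGetD
              ((PySem.Dict.mk ((PySem.Dict.mk primary_data).getD ce.1 [])).getD player []) 6 0)).sum) 0 := by
      apply PySem.List.foldl_congr_mem
      intro tm ce hce
      rw [pv_getD_mk e.2 ce hce (hnd2 e he) [], PySem.List.foldl_add]
    rw [hc, PySem.List.foldl_add]
    simp
  rw [hmap]
  exact pv_max_eq_sorted_head _ (by simpa using hne)
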